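-- pv_equiv track=rewrite | github.com/iliyan-pigeon/Soft-uni-Courses | pythonProject1Advanced/functions_advanced_exercise/negative_vs_positive.py | separate_and_sum
-- ===== SOURCE A (Python) =====
-- def separate_and_sum(numbers_list):
--     positive = []
--     negative = []
--     for number in numbers_list:
--         if number > 0:
--             positive.append(number)
--         elif number < 0:
--             negative.append(number)
--
--     def add_and_evaluate():
--         current_result = ""
--         current_result += str(sum(negative)) + "\n"
--         current_result += str(sum(positive)) + "\n"
--         if abs(sum(negative)) > abs(sum(positive)):
--             current_result += "The negatives are stronger than the positives"
--         else:
--             current_result += "The positives are stronger than the negatives"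
--         return current_result
--     return add_and_evaluate()
-- ===== SOURCE B (Python) =====
-- def separate_and_sum(numbers_list):
--     pos_sum = 0
--     neg_sum = 0
--     for number in numbers_list:
--         if number > 0:
--             pos_sum += number
--         elif number < 0:
--             neg_sum += number
--     verdict = ("The negatives are stronger than the positives"
--                if abs(neg_sum) > abs(pos_sum)
--                else "The positives are stronger than the negatives")
--     return str(neg_sum) + "\n" + str(pos_sum) + "\n" + verdict
-- ===== Notes on version B (the rewrite author's own statement) =====
-- stated objective: simpler
-- what changed: Replaces the two accumulated lists, the inner helper function and the four re-scanning sum() calls with one pass keeping two integer accumulators and a direct string build.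
import Mathlib
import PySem

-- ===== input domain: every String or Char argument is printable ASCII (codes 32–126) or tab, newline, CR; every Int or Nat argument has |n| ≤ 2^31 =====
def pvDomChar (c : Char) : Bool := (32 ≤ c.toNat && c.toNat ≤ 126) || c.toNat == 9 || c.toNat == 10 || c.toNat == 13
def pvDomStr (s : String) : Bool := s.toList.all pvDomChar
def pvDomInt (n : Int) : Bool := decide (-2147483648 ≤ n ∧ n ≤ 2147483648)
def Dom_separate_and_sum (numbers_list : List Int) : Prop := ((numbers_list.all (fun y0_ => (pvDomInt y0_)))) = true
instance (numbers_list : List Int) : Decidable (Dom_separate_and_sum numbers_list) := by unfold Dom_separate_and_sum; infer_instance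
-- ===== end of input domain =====

-- B replaces A's two accumulated lists + helper + four sum() rescans by a single pass with two integer accumulators (simpler, O(1) extra space).

-- ===== PORT A =====
-- A: build 'positive' and 'negative' lists in one loop, then format using sum() of each list.
def separate_and_sum (numbers_list : List Int) : String :=
  let pn := numbers_list.foldl
    (fun (pn : List Int × List Int) number =>
      if number > 0 then (pn.1 ++ [number], pn.2)
      else if number < 0 then (pn.1, pn.2 ++ [number])
      else pn) ([], [])
  let positive := pn.1
  let negative := pn.2
  let r1 := PySem.Int.toStr negative.sum ++ "\n"
  let r2 := r1 ++ PySem.Int.toStr positive.sum ++ "\n"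
  if |negative.sum| > |positive.sum| then
    r2 ++ "The negatives are stronger than the positives"
  else
    r2 ++ "The positives are stronger than the negatives"

-- ===== PORT B =====
-- B: one pass keeping (pos_sum, neg_sum), then build the string directly.
def separate_and_sum_alt (numbers_list : List Int) : String :=
  let s := numbers_list.foldl
    (fun (s : Int × Int) number =>
      if number > 0 then (s.1 + number, s.2)
      else if number < 0 then (s.1, s.2 + number)
      else s) (0, 0)
  let verdict := if |s.2| > |s.1| then "The negatives are stronger than the positives"
                 else "The positives are stronger than the negatives"
  PySem.Int.toStr s.2 ++ "\n" ++ PySem.Int.toStr s.1 ++ "\n" ++ verdict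

-- ===== PRECONDITION & SPEC =====
def Spec_separate_and_sum (numbers_list : List Int) (out : String) : Prop := out = separate_and_sum_alt numbers_list
instance (numbers_list : List Int) (out : String) : Decidable (Spec_separate_and_sum numbers_list out) := by unfold Spec_separate_and_sum; infer_instance

-- ===== CLAIM (what is proved, stated in full; the proofs are below) =====
def Claim_equal_separate_and_sum : Prop := ∀ (numbers_list : List Int), Dom_separate_and_sum numbers_list → Spec_separate_and_sum numbers_list (separate_and_sum numbers_list)

-- ===== LEMMAS AND PROOFS =====

-- The list-building fold's component sums are exactly B's accumulated sums.
theorem separate_sums (l : List Int) (ps ns : List Int) (p n : Int)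
    (hp : ps.sum = p) (hn : ns.sum = n) :
    (l.foldl (fun (pn : List Int × List Int) number =>
      if number > 0 then (pn.1 ++ [number], pn.2)
      else if number < 0 then (pn.1, pn.2 ++ [number])
      else pn) (ps, ns)).1.sum = (l.foldl (fun (s : Int × Int) number =>
      if number > 0 then (s.1 + number, s.2)
      else if number < 0 then (s.1, s.2 + number)
      else s) (p, n)).1
    ∧ (l.foldl (fun (pn : List Int × List Int) number =>
      if number > 0 then (pn.1 ++ [number], pn.2)
      else if number < 0 then (pn.1, pn.2 ++ [number])
      else pn) (ps, ns)).2.sum = (l.foldl (fun (s : Int × Int) number =>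
      if number > 0 then (s.1 + number, s.2)
      else if number < 0 then (s.1, s.2 + number)
      else s) (p, n)).2 := by
  induction l generalizing ps ns p n with
  | nil => simp [hp, hn]
  | cons x xs ih =>
    simp only [List.foldl_cons]
    split_ifs with h1 h2 <;>
      exact ih _ _ _ _ (by simp [hp]) (by simp [hn])

-- ===== VERDICT (by name: the statement is the Claim_ definition above) =====
theorem separate_and_sum_spec : Claim_equal_separate_and_sum := by
  intro l _
  unfold Spec_separate_and_sum separate_and_sum separate_and_sum_alt
  obtain ⟨h1, h2⟩ := separate_sums l [] [] 0 0 rfl rfl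
  simp only [h1, h2]
  split <;> rfl
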